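-- pv_equiv track=rewrite | github.com/DanEngelbrecht/gitbugz | gitbugz/src/gitbugzutils.py | getFollowingCaseNumbers
-- ===== SOURCE A (Python) =====
-- import string
--
-- def getFollowingCaseNumbers(caseString):
--     result = set()
--     caseString = caseString.lstrip(' ,:;#')
--     while len(caseString) > 0:
--         caseString = caseString.lstrip(' ,#+&')
--         numpos = 0
--         while (numpos < len(caseString)) and (string.digits.find(caseString[numpos]) != -1):
--             numpos = numpos + 1
--         if numpos > 0:
--             casenumberstring = caseString[0:numpos]
--             casenumber = int(casenumberstring)
--             if casenumber > 0 :
--                 result.add(casenumber)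
--             caseString = caseString[numpos:]
--         else:
--             break
--     return result
-- ===== SOURCE B (Python) =====
-- import string
--
-- def getFollowingCaseNumbers(caseString):
--     # Single left-to-right state-machine scan: accumulate each digit run in a
--     # buffer, flush it at a delimiter or at the end, stop at any other char.
--     result = set()
--     s = caseString.lstrip(' ,:;#')
--     tok = ''
--     for ch in s:
--         if ch in string.digits:
--             tok += ch
--         elif ch in ' ,#+&':
--             if tok:
--                 n = int(tok)
--                 if n > 0:
--                     result.add(n)
--                 tok = ''
--         else:
--             break
--     if tok:
--         n = int(tok)
--         if n > 0:
--             result.add(n)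
--     return result
-- ===== Notes on version B (the rewrite author's own statement) =====
-- stated objective: alternative
-- what changed: Replaces A's outer while-loop of repeated lstrip + index-scan + string slicing with a single left-to-right character state machine that buffers the current digit run and flushes it at delimiters or at the end.
import Mathlib
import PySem

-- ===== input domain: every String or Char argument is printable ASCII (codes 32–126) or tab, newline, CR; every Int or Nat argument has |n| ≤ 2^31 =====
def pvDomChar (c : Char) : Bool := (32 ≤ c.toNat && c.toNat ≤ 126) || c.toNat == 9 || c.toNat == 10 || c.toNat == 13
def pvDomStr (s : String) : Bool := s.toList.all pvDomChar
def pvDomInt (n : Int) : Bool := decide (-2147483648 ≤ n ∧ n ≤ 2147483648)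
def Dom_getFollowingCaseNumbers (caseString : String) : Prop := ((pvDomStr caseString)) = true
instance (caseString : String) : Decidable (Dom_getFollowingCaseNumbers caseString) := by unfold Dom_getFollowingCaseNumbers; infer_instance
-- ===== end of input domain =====

-- B replaces A's repeated lstrip+slice tokenizer by a single-pass character state machine (alternative decomposition, same results).


-- ===== PORT A =====
-- c in "0123456789"  (string.digits.find(c) != -1)
def gfcDig (c : Char) : Bool := ("0123456789".toList).contains c
-- c in ' ,#+&'  (the loop's lstrip set)
def gfcDelim (c : Char) : Bool := ([' ', ',', '#', '+', '&'] : List Char).contains c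
-- c in ' ,:;#'  (the one-time initial lstrip set)
def gfcInit (c : Char) : Bool := ([' ', ',', ':', ';', '#'] : List Char).contains c

-- the outer while loop; lstrip(chars) is ported by hand as dropWhile (exact), the
-- inner numpos while loop as takeWhile-length (exact).
def gfcnLoop (cs : List Char) (result : List Int) : List Int :=
  if _h : cs = [] then result else
  let cs2 := cs.dropWhile gfcDelim
  let numpos := (cs2.takeWhile gfcDig).length
  if _h2 : numpos > 0 then
    let casenumberstring := cs2.take numpos
    let casenumber := (PySem.Int.ofChars? casenumberstring).getD 0
    let result := if casenumber > 0 then PySem.Set.add result casenumber else result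
    gfcnLoop (cs2.drop numpos) result
  else result
termination_by cs.length
decreasing_by
  have h1 : (cs.dropWhile gfcDelim).length ≤ cs.length := List.length_dropWhile_le _ _
  have h2 : 0 < cs.length := List.length_pos_iff.mpr _h
  simp only [cs2, numpos, List.length_drop] at _h2 ⊢
  omega

def getFollowingCaseNumbers (caseString : String) : List Int :=
  gfcnLoop ((caseString.toList).dropWhile gfcInit) []

-- ===== PORT B =====
-- the for-loop over the characters: state (result, tok); returns the state at the
-- break / end of string.
def gfcScan : List Char → List Int → List Char → (List Int × List Char)
  | [], result, tok => (result, tok)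
  | c :: rest, result, tok =>
    if gfcDig c then gfcScan rest result (tok ++ [c])
    else if gfcDelim c then
      if tok = [] then gfcScan rest result tok
      else
        let n := (PySem.Int.ofChars? tok).getD 0
        gfcScan rest (if n > 0 then PySem.Set.add result n else result) []
    else (result, tok)

def getFollowingCaseNumbers_alt (caseString : String) : List Int :=
  let s := (caseString.toList).dropWhile gfcInit
  let p := gfcScan s [] []
  if p.2 = [] then p.1
  else
    let n := (PySem.Int.ofChars? p.2).getD 0
    if n > 0 then PySem.Set.add p.1 n else p.1

-- ===== PRECONDITION & SPEC =====
def Spec_getFollowingCaseNumbers (caseString : String) (out : List Int) : Prop := out = getFollowingCaseNumbers_alt caseString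
instance (caseString : String) (out : List Int) : Decidable (Spec_getFollowingCaseNumbers caseString out) := by unfold Spec_getFollowingCaseNumbers; infer_instance

-- ===== CLAIM (what is proved, stated in full; the proofs are below) =====
def Claim_equal_getFollowingCaseNumbers : Prop := ∀ (caseString : String), Dom_getFollowingCaseNumbers caseString → Spec_getFollowingCaseNumbers caseString (getFollowingCaseNumbers caseString)

-- ===== LEMMAS AND PROOFS =====

-- a digit is not a loop delimiter
theorem gfcDig_not_delim {c : Char} (h : gfcDig c = true) : gfcDelim c = false := by
  simp [gfcDig] at h
  rcases h with h | h | h | h | h | h | h | h | h | h <;> subst h <;> decide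

-- B's final flush of the pending token
def gfcFlush (p : List Int × List Char) : List Int :=
  if p.2 = [] then p.1
  else
    let n := (PySem.Int.ofChars? p.2).getD 0
    if n > 0 then PySem.Set.add p.1 n else p.1

-- S1: with an empty buffer, the scanner skips a delimiter prefix
theorem gfcScan_dropWhile (cs : List Char) (result : List Int) :
    gfcScan cs result [] = gfcScan (cs.dropWhile gfcDelim) result [] := by
  induction cs with
  | nil => rfl
  | cons c rest ih =>
    by_cases hd : gfcDelim c = true
    · have hdig : gfcDig c = false := by
        by_contra h
        have := gfcDig_not_delim (by simpa using h)
        simp [this] at hd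
      simp [gfcScan, hdig, hd, ih]
    · simp at hd
      simp [hd]

-- S2: a run of digits is appended to the buffer
theorem gfcScan_digits (ds : List Char) (h : ∀ c ∈ ds, gfcDig c = true) :
    ∀ (rest : List Char) (result : List Int) (tok : List Char),
    gfcScan (ds ++ rest) result tok = gfcScan rest result (tok ++ ds) := by
  induction ds with
  | nil => intro rest result tok; simp
  | cons d ds ih =>
    intro rest result tok
    have hd : gfcDig d = true := h d (by simp)
    simp only [List.cons_append, gfcScan, hd, if_pos]
    rw [ih (fun c hc => h c (by simp [hc])) rest result (tok ++ [d])]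
    simp

-- main loop correspondence, by strong induction on the length
theorem gfcn_main (n : Nat) :
    ∀ (cs : List Char), cs.length ≤ n → ∀ (result : List Int),
    gfcnLoop cs result = gfcFlush (gfcScan cs result []) := by
  induction n with
  | zero =>
    intro cs hlen result
    have : cs = [] := List.eq_nil_of_length_eq_zero (Nat.le_zero.mp hlen)
    subst this
    rw [gfcnLoop.eq_def]
    simp [gfcScan, gfcFlush]
  | succ n ih =>
    intro cs hlen result
    by_cases hnil : cs = []
    · subst hnil
      rw [gfcnLoop.eq_def]
      simp [gfcScan, gfcFlush]
    · rw [gfcnLoop.eq_def]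
      simp only [hnil, dite_false]
      set cs2 := cs.dropWhile gfcDelim with hcs2
      have hsplit : cs2.takeWhile gfcDig ++ cs2.dropWhile gfcDig = cs2 :=
        List.takeWhile_append_dropWhile
      set ds := cs2.takeWhile gfcDig with hds
      set rest := cs2.dropWhile gfcDig with hrest
      have hallds : ∀ c ∈ ds, gfcDig c = true := fun c hc => List.mem_takeWhile_imp hc
      have hcs2len : cs2.length ≤ cs.length := List.length_dropWhile_le _ _
      have hscan : gfcScan cs result [] = gfcScan rest result ds := by
        rw [gfcScan_dropWhile, ← hcs2, ← hsplit, gfcScan_digits ds hallds]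
        simp
      by_cases hpos : ds.length > 0
      · simp only [hpos, dite_true]
        have htake : cs2.take ds.length = ds := by
          rw [← hsplit]; exact List.take_left
        have hdrop : cs2.drop ds.length = rest := by
          rw [← hsplit]; exact List.drop_left
        rw [htake, hdrop]
        set r' := if (PySem.Int.ofChars? ds).getD 0 > 0
                  then PySem.Set.add result ((PySem.Int.ofChars? ds).getD 0) else result with hr'
        have hrestlen : rest.length ≤ n := by
          have : rest.length + ds.length = cs2.length := by
            rw [← hsplit]; simp [Nat.add_comm]
          have h0 : 0 < cs.length := List.length_pos_iff.mpr hnil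
          omega
        rw [ih rest hrestlen r', hscan]
        -- rest's head is not a digit
        cases hre : rest with
        | nil =>
          have hdsne : ds ≠ [] := by
            intro h; rw [h] at hpos; simp at hpos
          simp [gfcScan, gfcFlush, hdsne, hr']
        | cons c t =>
          have hcnotdig : gfcDig c = false := by
            have := List.head?_dropWhile_not gfcDig cs2
            rw [← hrest, hre] at this
            simpa using this
          have hdsne : ds ≠ [] := by
            intro h; rw [h] at hpos; simp at hpos
          by_cases hcdel : gfcDelim c = true
          · simp [gfcScan, gfcFlush, hcnotdig, hcdel, hdsne, hr']
          · simp at hcdel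
            simp [gfcScan, gfcFlush, hcnotdig, hcdel, hdsne, hr']
      · -- no digits: A breaks; B's scanner stops at rest's head with empty buffer
        simp only [hpos, dite_false]
        have hds : ds = [] := List.eq_nil_of_length_eq_zero (by omega)
        rw [hscan, hds]
        cases hre : rest with
        | nil => simp [gfcScan, gfcFlush]
        | cons c t =>
          have hcnotdig : gfcDig c = false := by
            have := List.head?_dropWhile_not gfcDig cs2
            rw [← hrest, hre] at this
            simpa using this
          have hcnotdel : gfcDelim c = false := by
            have hr2 : rest = cs2 := by rw [← hsplit, hds]; simp
            have := List.head?_dropWhile_not gfcDelim cs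
            rw [← hcs2, ← hr2, hre] at this
            simpa using this
          simp [gfcScan, gfcFlush, hcnotdig, hcnotdel]

-- ===== VERDICT (by name: the statement is the Claim_ definition above) =====
theorem getFollowingCaseNumbers_spec : Claim_equal_getFollowingCaseNumbers := by
  intro caseString _
  unfold Spec_getFollowingCaseNumbers getFollowingCaseNumbers getFollowingCaseNumbers_alt
  rw [gfcn_main ((caseString.toList).dropWhile gfcInit).length _ le_rfl]
  rfl
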